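-- pv_equiv track=rewrite | github.com/dahrs/translationBureauProject | utils/utilsGraph.py | remove1DegreeNodes
-- ===== SOURCE A (Python) =====
-- def remove1DegreeNodes(dictA, dictB, aOldSize=0, bOldSize=0):
-- 	'''
-- 	recursive function to remove all the less core-connected
-- 	nodes from the dicts representing the graph
-- 	'''
-- 	aOriginalSize = len(dictA)
-- 	bOriginalSize = len(dictB)
-- 	#remove job titles of degree 1 (with only one skill)
-- 	for aKey, aList in dict(dictA).items():
-- 		#if there is one (or less) skill for that job title
-- 		if len(aList) <= 1:
-- 			#to maintain consistency, delete the job title from the skill to jobs dict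
-- 			for bElem in list(aList):
-- 				#delete the job title from the skill to jobs dict
-- 				dictB[bElem].remove(aKey)
-- 				#remove the keys in the dict with an empty list as value
-- 				if len(dictB[bElem]) == 0:
-- 					del dictB[bElem]
-- 			#delete the dict entry from the job to skills dict
-- 			del dictA[aKey]
-- 	if len(dictA) != aOriginalSize and aOriginalSize != aOldSize and len(dictB) != bOriginalSize and bOriginalSize != bOldSize:
-- 		dictB, dictA = remove1DegreeNodes(dictB, dictA, bOriginalSize, aOriginalSize)
-- 	return dictA, dictB
-- ===== SOURCE B (Python) =====
-- def remove1DegreeNodes(dictA, dictB, aOldSize=0, bOldSize=0):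
--     '''
--     Iterative re-implementation: a while loop over a current/other pair of
--     dicts; each pass peels all degree-<=1 keys of `cur` at once (set of doomed
--     keys, then filter-rebuild of `other`) instead of sequential in-place
--     mutation, swapping roles between passes.  Returns a fresh pair (does not
--     mutate its arguments, unlike the original): equivalence is about the
--     return value only.
--     '''
--     cur, other = dict(dictA), dict(dictB)
--     curOld, otherOld = aOldSize, bOldSize
--     flipped = False
--     while True:
--         curOrig, otherOrig = len(cur), len(other)
--         doomed = {k: v for k, v in cur.items() if len(v) <= 1}
--         cur = {k: v for k, v in cur.items() if k not in doomed}
--         newOther = {}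
--         for b, lst in other.items():
--             kept = [x for x in lst if not (x in doomed and b in doomed[x])]
--             if kept or not lst:
--                 newOther[b] = kept
--         other = newOther
--         if len(cur) != curOrig and curOrig != curOld and len(other) != otherOrig and otherOrig != otherOld:
--             cur, other = other, cur
--             curOld, otherOld = otherOrig, curOrig
--             flipped = not flipped
--         else:
--             break
--     return (other, cur) if flipped else (cur, other)
-- ===== Notes on version B (the rewrite author's own statement) =====
-- stated objective: alternative
-- what changed: The swapped-argument recursion is replaced by a while-True loop over a current/other pair with an orientation flag, and each peeling pass is computed by building the dict of doomed (degree-<=1) keys once and rebuilding both dicts with comprehensions/filters instead of A's sequential in-place remove/del mutations; B does not mutate its arguments (equivalence is about the return value).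
import Mathlib
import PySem

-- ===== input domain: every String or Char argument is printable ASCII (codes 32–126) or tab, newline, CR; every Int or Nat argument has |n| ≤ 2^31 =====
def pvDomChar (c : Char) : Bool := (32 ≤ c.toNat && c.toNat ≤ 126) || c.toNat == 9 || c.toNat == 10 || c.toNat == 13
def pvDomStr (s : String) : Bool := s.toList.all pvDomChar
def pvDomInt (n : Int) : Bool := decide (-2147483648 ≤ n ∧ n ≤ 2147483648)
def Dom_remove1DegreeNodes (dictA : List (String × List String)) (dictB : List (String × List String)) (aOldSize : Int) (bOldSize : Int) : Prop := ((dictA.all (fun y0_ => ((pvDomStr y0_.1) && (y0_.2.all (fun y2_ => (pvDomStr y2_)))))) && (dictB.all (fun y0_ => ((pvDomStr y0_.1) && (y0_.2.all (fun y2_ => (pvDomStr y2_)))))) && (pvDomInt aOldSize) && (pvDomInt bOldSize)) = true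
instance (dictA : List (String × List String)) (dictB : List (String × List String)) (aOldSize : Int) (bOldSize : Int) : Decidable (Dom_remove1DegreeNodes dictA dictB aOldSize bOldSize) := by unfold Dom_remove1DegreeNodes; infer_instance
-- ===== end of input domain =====

-- ===== PORT A =====
-- A's recursion peels degree-≤1 keys of dictA in place (remove from dictB, delete emptied
-- entries), then recurses with the dicts swapped when all four size tests pass.
-- The dict arguments are built with PySem.Dict.ofList (Python dict semantics); the returned
-- dicts are rendered back as item lists.  Equivalence is about the return value only
-- (Python A mutates its arguments in place; B does not).

-- body of A's inner loop 'for bElem in list(aList)'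
def pvRemoveFromB (aKey : String) (dB : PySem.Dict String (List String)) (bElem : String) :
    PySem.Dict String (List String) :=
  let lst := (PySem.List.remove? (dB.getD bElem []) aKey).getD []
  if lst.length = 0 then dB.erase bElem else dB.insert bElem lst

-- body of A's outer loop 'for aKey, aList in dict(dictA).items()'
def pvPeelStep (st : PySem.Dict String (List String) × PySem.Dict String (List String))
    (kv : String × List String) :
    PySem.Dict String (List String) × PySem.Dict String (List String) :=
  if kv.2.length ≤ 1 then
    (st.1.erase kv.1, kv.2.foldl (pvRemoveFromB kv.1) st.2)
  else st

theorem pvRemoveFromB_size_le (k : String) (dB : PySem.Dict String (List String)) (b : String) :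
    (pvRemoveFromB k dB b).size ≤ dB.size := by
  unfold pvRemoveFromB
  dsimp only
  split
  · exact List.length_filter_le _ _
  · unfold PySem.Dict.insert
    split
    · simp [PySem.Dict.size]
    · -- not contained: getD = [], remove? [] = none, lst = [] so length = 0, contradiction
      rename_i hlen hcon
      exfalso
      have hg : dB.get? b = none := by
        rw [PySem.Dict.get?_eq_none_iff_contains]
        simpa using hcon
      simp [PySem.Dict.getD, hg, PySem.List.remove?] at hlen
  
theorem pvFoldRemove_size_le (vs : List String) (k : String)
    (dB : PySem.Dict String (List String)) :
    (vs.foldl (pvRemoveFromB k) dB).size ≤ dB.size := by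
  induction vs generalizing dB with
  | nil => exact le_refl _
  | cons b vs ih => exact le_trans (ih _) (pvRemoveFromB_size_le k dB b)

theorem pvPeelFold_size_le (L : List (String × List String))
    (st : PySem.Dict String (List String) × PySem.Dict String (List String)) :
    (L.foldl pvPeelStep st).1.size ≤ st.1.size ∧ (L.foldl pvPeelStep st).2.size ≤ st.2.size := by
  induction L generalizing st with
  | nil => exact ⟨le_refl _, le_refl _⟩
  | cons kv L ih =>
    refine ⟨le_trans (ih (pvPeelStep st kv)).1 ?_, le_trans (ih (pvPeelStep st kv)).2 ?_⟩
    · unfold pvPeelStep; split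
      · exact List.length_filter_le _ _
      · exact le_refl _
    · unfold pvPeelStep; split
      · exact pvFoldRemove_size_le _ _ _
      · exact le_refl _

def pvGoA (dA dB : PySem.Dict String (List String)) (aOld bOld : Int) :
    PySem.Dict String (List String) × PySem.Dict String (List String) :=
  let aOrig := dA.size
  let bOrig := dB.size
  let st := dA.items.foldl pvPeelStep (dA, dB)
  if h : st.1.size ≠ aOrig ∧ (aOrig : Int) ≠ aOld ∧ st.2.size ≠ bOrig ∧ (bOrig : Int) ≠ bOld then
    let r := pvGoA st.2 st.1 bOrig aOrig
    (r.2, r.1)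
  else st
termination_by dA.size + dB.size
decreasing_by
  simp only [st] at h
  have hle := pvPeelFold_size_le dA.items (dA, dB)
  simp only [List.foldl_attach, ne_eq] at *
  omega

def remove1DegreeNodes (dictA : List (String × List String)) (dictB : List (String × List String)) (aOldSize : Int) (bOldSize : Int) : (List (String × List String)) × (List (String × List String)) :=
  let r := pvGoA (PySem.Dict.ofList dictA) (PySem.Dict.ofList dictB) aOldSize bOldSize
  (r.1.items, r.2.items)

-- ===== PORT B =====
-- B: a while-True loop over a current/other pair; each pass collects the doomed (degree-≤1)
-- keys of `cur` as a dict, rebuilds `cur` and `other` by comprehensions/filters, and swaps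
-- the roles between passes, tracking orientation in a flag.

def pvDoomed (cur : PySem.Dict String (List String)) : PySem.Dict String (List String) :=
  PySem.Dict.ofList (cur.items.filter (fun kv => decide (kv.2.length ≤ 1)))

def pvPass (cur other : PySem.Dict String (List String)) :
    PySem.Dict String (List String) × PySem.Dict String (List String) :=
  let doomed := pvDoomed cur
  let cur' := PySem.Dict.ofList (cur.items.filter (fun kv => !(doomed.contains kv.1)))
  let other' := other.items.foldl (fun nd p =>
      let kept := p.2.filter (fun x => !(doomed.contains x && (doomed.getD x []).contains p.1))
      if !kept.isEmpty || p.2.isEmpty then nd.insert p.1 kept else nd) PySem.Dict.empty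
  (cur', other')

theorem pvCondInsert_size_le (M : List (String × List String))
    (g : String × List String → List String)
    (nd : PySem.Dict String (List String)) :
    (M.foldl (fun nd p => if !(g p).isEmpty || p.2.isEmpty then nd.insert p.1 (g p) else nd) nd).size
      ≤ nd.size + M.length := by
  induction M generalizing nd with
  | nil => simp
  | cons p M ih =>
    refine le_trans (ih _) ?_
    have : (if !(g p).isEmpty || p.2.isEmpty then nd.insert p.1 (g p) else nd).size ≤ nd.size + 1 := by
      split
      · unfold PySem.Dict.insert
        split <;> simp [PySem.Dict.size]
      · omega
    simp only [List.length_cons]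
    omega

theorem pvUpdate_size_le (ps : List (String × List String)) (d : PySem.Dict String (List String)) :
    (d.update ps).size ≤ d.size + ps.length := by
  induction ps generalizing d with
  | nil => simp [PySem.Dict.update, PySem.Dict.size]
  | cons p ps ih =>
    have h1 : (d.insert p.1 p.2).size ≤ d.size + 1 := by
      unfold PySem.Dict.insert
      split <;> simp [PySem.Dict.size]
    have h2 := ih (d.insert p.1 p.2)
    have h3 : (d.update (p :: ps)) = ((d.insert p.1 p.2).update ps) := rfl
    rw [h3]
    simp only [List.length_cons]
    omega

theorem pvOfList_size_le (ps : List (String × List String)) :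
    (PySem.Dict.ofList ps).size ≤ ps.length := by
  have := pvUpdate_size_le ps PySem.Dict.empty
  simpa [PySem.Dict.empty, PySem.Dict.size] using this

theorem pvPass_size_le (cur other : PySem.Dict String (List String)) :
    (pvPass cur other).1.size ≤ cur.size ∧ (pvPass cur other).2.size ≤ other.size := by
  constructor
  · exact le_trans (pvOfList_size_le _) (le_trans (List.length_filter_le _ _) (le_refl _))
  · exact le_trans (pvCondInsert_size_le other.items _ PySem.Dict.empty)
      (by simp [PySem.Dict.empty, PySem.Dict.size])

def pvGoB (cur other : PySem.Dict String (List String)) (curOld otherOld : Int) (flipped : Bool) :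
    PySem.Dict String (List String) × PySem.Dict String (List String) :=
  let curOrig := cur.size
  let otherOrig := other.size
  let st := pvPass cur other
  if h : st.1.size ≠ curOrig ∧ (curOrig : Int) ≠ curOld ∧ st.2.size ≠ otherOrig ∧ (otherOrig : Int) ≠ otherOld then
    pvGoB st.2 st.1 otherOrig curOrig (!flipped)
  else if flipped then (st.2, st.1) else (st.1, st.2)
termination_by cur.size + other.size
decreasing_by
  have hst : st = pvPass cur other := rfl
  have hle := pvPass_size_le cur other
  simp only [List.foldl_attach, ne_eq] at *
  rw [hst] at h
  omega

def remove1DegreeNodes_alt (dictA : List (String × List String)) (dictB : List (String × List String)) (aOldSize : Int) (bOldSize : Int) : (List (String × List String)) × (List (String × List String)) :=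
  let r := pvGoB (PySem.Dict.ofList dictA) (PySem.Dict.ofList dictB) aOldSize bOldSize false
  (r.1.items, r.2.items)

-- ===== PRECONDITION & SPEC =====
-- Bool helpers for the precondition (read on the ofList'd dicts, i.e. after Python's dict
-- construction):

-- value lists contain no duplicates
def pvVN (d : PySem.Dict String (List String)) : Bool :=
  d.items.all (fun p => decide p.2.Nodup)
-- every edge of a is mirrored in b
def pvSafeDir (a b : PySem.Dict String (List String)) : Bool :=
  a.items.all (fun p => p.2.all (fun v => b.contains v && (b.getD v []).contains p.1))
-- every edge of a doomed (degree-≤1) key of a is mirrored in b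
def pvSafe1 (a b : PySem.Dict String (List String)) : Bool :=
  a.items.all (fun p => !decide (p.2.length ≤ 1) || p.2.all (fun v => b.contains v && (b.getD v []).contains p.1))
-- x is a doomed (degree-≤1) key listed in L whose list contains b
def pvRemB (L : List (String × List String)) (b x : String) : Bool :=
  L.any (fun q => q.1 == x && decide (q.2.length ≤ 1) && q.2.contains b)
-- every removable (doomed-referenced) key occurs exactly once in the list it is removed from
def pvTouched1 (a b : PySem.Dict String (List String)) : Bool :=
  b.items.all (fun p => p.2.all (fun x => !pvRemB a.items p.1 x || decide (p.2.count x = 1)))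
-- the recursion stops after the first pass
def pvStop1 (a b : PySem.Dict String (List String)) (ao bo : Int) : Bool :=
  decide ((a.size : Int) = ao) || decide ((b.size : Int) = bo) ||
  a.items.all (fun p => decide (1 < p.2.length)) ||
  b.items.all (fun p => p.2.isEmpty || p.2.any (fun x => !pvRemB a.items p.1 x))

-- Pre_ excludes inputs on which A raises KeyError/ValueError (a degree-≤1 key whose list is
-- not mirrored in the other dict, at some recursion depth) and, as a defensible corner,
-- inputs where a removed key occurs several times in an adjacency list, where A's
-- remove-first-occurrence behaviour is accidental: it admits inputs that are either a fully
-- consistent duplicate-free bipartite graph (every recursion level safe) or whose first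
-- pass is safe, removes each key from a duplicate-free position, and is provably the last.
def Pre_remove1DegreeNodes (dictA : List (String × List String)) (dictB : List (String × List String)) (aOldSize : Int) (bOldSize : Int) : Prop :=
  ((pvVN (PySem.Dict.ofList dictA) && pvVN (PySem.Dict.ofList dictB) &&
    pvSafeDir (PySem.Dict.ofList dictA) (PySem.Dict.ofList dictB) &&
    pvSafeDir (PySem.Dict.ofList dictB) (PySem.Dict.ofList dictA)) ||
   (pvSafe1 (PySem.Dict.ofList dictA) (PySem.Dict.ofList dictB) &&
    pvStop1 (PySem.Dict.ofList dictA) (PySem.Dict.ofList dictB) aOldSize bOldSize &&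
    pvTouched1 (PySem.Dict.ofList dictA) (PySem.Dict.ofList dictB))) = true

instance (dictA : List (String × List String)) (dictB : List (String × List String)) (aOldSize : Int) (bOldSize : Int) : Decidable (Pre_remove1DegreeNodes dictA dictB aOldSize bOldSize) := by
  unfold Pre_remove1DegreeNodes; infer_instance

def pvWitness_remove1DegreeNodes : (List (String × List String)) × (List (String × List String)) × Int × Int :=
  ([("j1", ["s1"]), ("j2", ["s1", "s2"])], [("s1", ["j1", "j2"]), ("s2", ["j2"])], 0, 0)

def Spec_remove1DegreeNodes (dictA : List (String × List String)) (dictB : List (String × List String)) (aOldSize : Int) (bOldSize : Int) (out : (List (String × List String)) × (List (String × List String))) : Prop := out = remove1DegreeNodes_alt dictA dictB aOldSize bOldSize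
instance (dictA : List (String × List String)) (dictB : List (String × List String)) (aOldSize : Int) (bOldSize : Int) (out : (List (String × List String)) × (List (String × List String))) : Decidable (Spec_remove1DegreeNodes dictA dictB aOldSize bOldSize out) := by unfold Spec_remove1DegreeNodes; infer_instance

-- ===== CLAIM (what is proved, stated in full; the proofs are below) =====
def Claim_equal_remove1DegreeNodes : Prop := ∀ (dictA : List (String × List String)) (dictB : List (String × List String)) (aOldSize : Int) (bOldSize : Int), Dom_remove1DegreeNodes dictA dictB aOldSize bOldSize → Pre_remove1DegreeNodes dictA dictB aOldSize bOldSize → Spec_remove1DegreeNodes dictA dictB aOldSize bOldSize (remove1DegreeNodes dictA dictB aOldSize bOldSize)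

-- ===== LEMMAS AND PROOFS =====
-- ---- list-level characterization of one peeling pass ----

def pvDoomedB (L : List (String × List String)) (x : String) : Bool :=
  L.any (fun q => q.1 == x && decide (q.2.length ≤ 1))

def pvOutBf (L : List (String × List String)) (p : String × List String) :
    Option (String × List String) :=
  let kept := p.2.filter (fun x => !pvRemB L p.1 x)
  if kept.isEmpty && !p.2.isEmpty then none else some (p.1, kept)

def pvOutB (L M : List (String × List String)) : List (String × List String) :=
  M.filterMap (pvOutBf L)

theorem pvDoomedB_iff (L : List (String × List String)) (x : String) :
    pvDoomedB L x = true ↔ ∃ q ∈ L, q.1 = x ∧ q.2.length ≤ 1 := by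
  simp [pvDoomedB, List.any_eq_true, and_assoc]

theorem pvRemB_iff (L : List (String × List String)) (b x : String) :
    pvRemB L b x = true ↔ ∃ q ∈ L, q.1 = x ∧ q.2.length ≤ 1 ∧ b ∈ q.2 := by
  simp [pvRemB, List.any_eq_true, and_assoc]

theorem pvDoomedB_cons (q : String × List String) (L : List (String × List String)) (x : String) :
    pvDoomedB (q :: L) x = ((q.1 == x && decide (q.2.length ≤ 1)) || pvDoomedB L x) := by
  simp [pvDoomedB]

theorem pvRemB_cons (q : String × List String) (L : List (String × List String)) (b x : String) :
    pvRemB (q :: L) b x = ((q.1 == x && decide (q.2.length ≤ 1) && q.2.contains b) || pvRemB L b x) := by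
  simp [pvRemB]

theorem pvKey_unique {M : List (String × List String)} (hk : (M.map Prod.fst).Nodup)
    {b : String} {u v : List String} (hu : (b, u) ∈ M) (hv : (b, v) ∈ M) : u = v := by
  have h1 : (PySem.Dict.mk M).get? b = some u :=
    PySem.Dict.get?_of_mem_items _ hu (by simpa [PySem.Dict.keys] using hk)
  have h2 : (PySem.Dict.mk M).get? b = some v :=
    PySem.Dict.get?_of_mem_items _ hv (by simpa [PySem.Dict.keys] using hk)
  rw [h1] at h2; exact Option.some.inj h2

theorem pvItems_erase (d : PySem.Dict String (List String)) (k : String) :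
    (d.erase k).items = d.items.filter (fun p => !(p.1 == k)) := rfl

theorem pvBeq_comm (x k : String) : (x == k) = (k == x) := by
  by_cases h : x = k
  · simp [h]
  · simp [beq_iff_eq, h, Ne.symm h]

theorem pvFilter_doomed_cons (A : List (String × List String)) (k : String) (vs : List String)
    (hv : vs.length ≤ 1) (L : List (String × List String)) :
    List.filter (fun kv => !pvDoomedB L kv.1) (A.filter (fun p => !(p.1 == k)))
      = A.filter (fun kv => !pvDoomedB ((k, vs) :: L) kv.1) := by
  rw [List.filter_filter]
  apply List.filter_congr
  intro p _
  simp only [pvDoomedB_cons, decide_eq_true hv, Bool.and_true, Bool.not_or, pvBeq_comm k p.1]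
  exact Bool.and_comm _ _

theorem pvRemB_cons_ne (k b : String) (L : List (String × List String)) (b' x : String)
    (hb : b' ≠ b) : pvRemB ((k, [b]) :: L) b' x = pvRemB L b' x := by
  simp [pvRemB_cons, hb]

theorem pvOutBf_cons_ne (k b : String) (L : List (String × List String))
    (p : String × List String) (hb : p.1 ≠ b) :
    pvOutBf ((k, [b]) :: L) p = pvOutBf L p := by
  unfold pvOutBf
  simp only [pvRemB_cons_ne k b L p.1 _ hb]

theorem pvErase_eq_filter_of_count {l : List String} {k : String} (h : l.count k ≤ 1) :
    l.erase k = l.filter (fun x => !(x == k)) := by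
  induction l with
  | nil => rfl
  | cons a l ih =>
    by_cases ha : a = k
    · subst ha
      have hc : l.count a = 0 := by
        have h2 : (a :: l).count a = l.count a + 1 := List.count_cons_self
        omega
      have hnotin : a ∉ l := by
        rw [← List.count_eq_zero]
        exact hc
      rw [List.erase_cons_head, List.filter_cons_of_neg (by simp)]
      exact (List.filter_eq_self.mpr (fun x hx => by
        have : (x == a) = false := beq_eq_false_iff_ne.mpr (fun he => hnotin (he ▸ hx))
        simp [this])).symm
    · rw [List.erase_cons_tail (by simp [beq_iff_eq, ha]), List.filter_cons_of_pos (by simp [beq_iff_eq, ha])]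
      congr 1
      apply ih
      have hcc : (a :: l).count k = l.count k := by
        rw [List.count_cons]
        simp [beq_iff_eq, ha]
      omega

theorem pvCount_one_of_nodup {l : List String} (h : l.Nodup) {x : String} (hx : x ∈ l) :
    l.count x = 1 := by
  have h1 := List.nodup_iff_count_le_one.mp h x
  have h2 : 0 < l.count x := List.count_pos_iff.mpr hx
  omega

theorem pvOutB_erase_case (M : List (String × List String)) (hkM : (M.map Prod.fst).Nodup)
    (b k : String) (lst : List String)
    (hmem : (b, lst) ∈ M) (hkin : k ∈ lst) (hsingle : lst.erase k = [])
    (L : List (String × List String)) :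
    pvOutB L (M.filter (fun p => !(p.1 == b))) = pvOutB ((k, [b]) :: L) M := by
  unfold pvOutB
  rw [List.filterMap_filter]
  apply List.filterMap_congr
  intro p hp
  by_cases hb : p.1 = b
  · have hpe : p = (b, lst) := by
      obtain ⟨p1, p2⟩ := p
      simp only at hb; subst hb
      exact congrArg _ (pvKey_unique hkM hp hmem)
    subst hpe
    rw [if_neg (by simp)]
    have hall : ∀ x ∈ lst, x = k := by
      have hlen0 : (lst.erase k).length = 0 := by rw [hsingle]; rfl
      have hlen1 : lst.length = 1 := by
        have := List.length_erase_of_mem hkin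
        have hpos : 0 < lst.length := List.length_pos_of_mem hkin
        omega
      rcases lst with _ | ⟨a, l⟩
      · simp at hkin
      · have hl : l = [] := by
          simp only [List.length_cons] at hlen1
          exact List.eq_nil_of_length_eq_zero (by omega)
        subst hl
        intro x hx
        have hxa : x = a := by simpa using hx
        have hka : k = a := by simpa using hkin
        rw [hxa, hka]
    unfold pvOutBf
    have hkept : lst.filter (fun x => !pvRemB ((k, [b]) :: L) b x) = [] := by
      apply List.filter_eq_nil_iff.mpr
      intro x hx
      simp [pvRemB_cons, hall x hx]
    simp only [hkept]
    rw [if_pos]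
    simp [List.isEmpty_iff, List.ne_nil_of_mem hkin]
  · have hbeq : (p.1 == b) = false := beq_eq_false_iff_ne.mpr hb
    simp only [hbeq, Bool.not_false, if_pos]
    exact (pvOutBf_cons_ne k b L p hb).symm

theorem pvOutB_insert_case (M : List (String × List String)) (hkM : (M.map Prod.fst).Nodup)
    (b k : String) (lst : List String)
    (hmem : (b, lst) ∈ M) (hkin : k ∈ lst) (hne : lst.erase k ≠ []) (hc1 : lst.count k ≤ 1)
    (L : List (String × List String)) :
    pvOutB L (M.map (fun p => if p.1 == b then (b, lst.erase k) else p)) = pvOutB ((k, [b]) :: L) M := by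
  unfold pvOutB
  rw [List.filterMap_map]
  apply List.filterMap_congr
  intro p hp
  by_cases hb : p.1 = b
  · have hpe : p = (b, lst) := by
      obtain ⟨p1, p2⟩ := p
      simp only at hb; subst hb
      exact congrArg _ (pvKey_unique hkM hp hmem)
    subst hpe
    simp only [Function.comp_apply, beq_self_eq_true, if_pos]
    unfold pvOutBf
    have hkept : (lst.erase k).filter (fun x => !pvRemB L b x)
        = lst.filter (fun x => !pvRemB ((k, [b]) :: L) b x) := by
      rw [pvErase_eq_filter_of_count hc1, List.filter_filter]
      apply List.filter_congr
      intro x _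
      cases hx : (k == x) <;> cases hr : pvRemB L b x <;>
        simp [pvRemB_cons, hx, hr, pvBeq_comm x k]
    simp only [hkept]
    have h1 : (lst.erase k).isEmpty = false := by
      simp [List.isEmpty_iff, hne]
    have h2 : lst.isEmpty = false := by
      simp [List.isEmpty_iff, List.ne_nil_of_mem hkin]
    simp [h1, h2]
  · have hbeq : (p.1 == b) = false := beq_eq_false_iff_ne.mpr hb
    simp only [Function.comp_apply, hbeq, Bool.false_eq_true, if_neg]
    exact (pvOutBf_cons_ne k b L p hb).symm

theorem pvRemB_mono (q : String × List String) (L : List (String × List String)) (b x : String)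
    (h : pvRemB L b x = true) : pvRemB (q :: L) b x = true := by
  rw [pvRemB_cons, h, Bool.or_true]

-- the A-side pass: folding A's outer-loop body over a snapshot L of the current dict
theorem pvPeelFold_eq (L : List (String × List String)) (hL : (L.map Prod.fst).Nodup)
    (st : PySem.Dict String (List String) × PySem.Dict String (List String))
    (hk2 : st.2.keys.Nodup)
    (hcount : ∀ p ∈ st.2.items, ∀ x ∈ p.2, pvRemB L p.1 x = true → p.2.count x = 1)
    (hsafe : ∀ k vs, (k, vs) ∈ L → vs.length ≤ 1 → ∀ b ∈ vs,
       ∃ lst, (b, lst) ∈ st.2.items ∧ k ∈ lst) :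
    L.foldl pvPeelStep st =
      (PySem.Dict.mk (st.1.items.filter (fun kv => !pvDoomedB L kv.1)),
       PySem.Dict.mk (pvOutB L st.2.items)) := by
  induction L generalizing st with
  | nil =>
    simp [pvDoomedB, pvOutB, pvOutBf, pvRemB, List.filterMap_eq_map]
  | cons q L ih =>
    obtain ⟨k, vs⟩ := q
    by_cases hlen : vs.length ≤ 1
    · -- doomed key: vs has at most one element
      have hLt : (List.map Prod.fst L).Nodup := (List.nodup_cons.mp (by simpa using hL)).2
      have hkmem : k ∉ List.map Prod.fst L := (List.nodup_cons.mp (by simpa using hL)).1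
      have hk2' : (st.2.items.map Prod.fst).Nodup := by simpa [PySem.Dict.keys] using hk2
      match vs, hlen with
      | [], _ =>
        have hstep : pvPeelStep st (k, []) = (st.1.erase k, st.2) := by
          unfold pvPeelStep; simp
        rw [List.foldl_cons, hstep,
          ih hLt (st.1.erase k, st.2) hk2
            (fun p hp x hx hr => hcount p hp x hx (pvRemB_mono _ _ _ _ hr))
            (fun k' vs' hm => hsafe k' vs' (List.mem_cons_of_mem _ hm))]
        simp only [Prod.mk.injEq]
        constructor
        · rw [pvItems_erase]
          exact congrArg _ (pvFilter_doomed_cons st.1.items k [] (by simp) L)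
        · congr 1
          unfold pvOutB
          apply List.filterMap_congr
          intro p _
          unfold pvOutBf
          simp [pvRemB_cons]
      | [b], _ =>
        obtain ⟨lst, hmem, hkin⟩ := hsafe k [b] List.mem_cons_self (by simp) b (by simp)
        have hget? : st.2.get? b = some lst := PySem.Dict.get?_of_mem_items _ hmem hk2
        have hget : st.2.getD b [] = lst := by simp [PySem.Dict.getD, hget?]
        have hc1 : lst.count k = 1 :=
          hcount _ hmem k hkin (by simp [pvRemB_cons])
        have hcon : st.2.contains b = true :=
          List.any_eq_true.mpr ⟨(b, lst), hmem, by simp⟩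
        have hstep : pvPeelStep st (k, [b]) =
            (st.1.erase k, pvRemoveFromB k st.2 b) := by
          unfold pvPeelStep; simp
        have hrem : pvRemoveFromB k st.2 b =
            (if (lst.erase k).length = 0 then st.2.erase b else st.2.insert b (lst.erase k)) := by
          unfold pvRemoveFromB
          rw [hget, PySem.List.remove?_eq_some_erase lst k hkin]
          rfl
        by_cases hemp : (lst.erase k).length = 0
        · -- the entry at b is emptied and deleted
          have hsingle : lst.erase k = [] := List.length_eq_zero_iff.mp hemp
          rw [List.foldl_cons, hstep, hrem, if_pos hemp,
            ih hLt (st.1.erase k, st.2.erase b)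
              (by
                rw [PySem.Dict.keys] at hk2 ⊢
                rw [pvItems_erase]
                exact List.Nodup.sublist (List.filter_sublist.map Prod.fst) hk2)
              (fun p hp x hx hr =>
                hcount p (List.mem_of_mem_filter hp) x hx (pvRemB_mono _ _ _ _ hr))
              (fun k' vs' hm hlen' b' hb' => by
                obtain ⟨u, hu, hku⟩ := hsafe k' vs' (List.mem_cons_of_mem _ hm) hlen' b' hb'
                have hk'ne : k' ≠ k := by
                  intro hEq; subst hEq
                  exact hkmem (List.mem_map.mpr ⟨(k', vs'), hm, rfl⟩)
                by_cases hb'b : b' = b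
                · subst hb'b
                  have hul : u = lst := pvKey_unique hk2' hu hmem
                  rw [hul] at hku
                  exact absurd (List.mem_erase_of_ne hk'ne |>.mpr hku) (by simp [hsingle])
                · exact ⟨u, List.mem_filter.mpr ⟨hu, by simp [hb'b]⟩, hku⟩)]
          simp only [Prod.mk.injEq]
          constructor
          · rw [pvItems_erase]
            exact congrArg _ (pvFilter_doomed_cons st.1.items k [b] (by simp) L)
          · rw [pvItems_erase]
            exact congrArg _ (pvOutB_erase_case st.2.items hk2' b k lst hmem hkin hsingle L)
        · -- the entry at b is overwritten in place
          have hne : lst.erase k ≠ [] := fun h => hemp (by simp [h])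
          have hitems : (st.2.insert b (lst.erase k)).items =
              st.2.items.map (fun p => if p.1 == b then (b, lst.erase k) else p) :=
            PySem.Dict.items_insert_of_contains _ _ hcon
          rw [List.foldl_cons, hstep, hrem, if_neg hemp,
            ih hLt (st.1.erase k, st.2.insert b (lst.erase k))
              (by
                show (st.2.insert b (lst.erase k)).keys.Nodup
                rw [PySem.Dict.keys_insert_of_contains _ _ hcon]; exact hk2)
              (fun p hp x hx hr => by
                rcases (PySem.Dict.mem_items_insert _ _ _ _).mp hp with hEq | ⟨hpm, _⟩
                · subst hEq
                  have hxl : x ∈ lst := (List.erase_sublist (a := k) (l := lst)).mem hx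
                  have hc := hcount _ hmem x hxl (pvRemB_mono _ _ _ _ hr)
                  have hle : (lst.erase k).count x ≤ lst.count x :=
                    (List.erase_sublist (a := k) (l := lst)).count_le x
                  have hpos : 0 < (lst.erase k).count x := List.count_pos_iff.mpr hx
                  simp only at *
                  omega
                · exact hcount p hpm x hx (pvRemB_mono _ _ _ _ hr))
              (fun k' vs' hm hlen' b' hb' => by
                obtain ⟨u, hu, hku⟩ := hsafe k' vs' (List.mem_cons_of_mem _ hm) hlen' b' hb'
                have hk'ne : k' ≠ k := by
                  intro hEq; subst hEq
                  exact hkmem (List.mem_map.mpr ⟨(k', vs'), hm, rfl⟩)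
                by_cases hb'b : b' = b
                · subst hb'b
                  have hul : u = lst := pvKey_unique hk2' hu hmem
                  rw [hul] at hku
                  exact ⟨lst.erase k, PySem.Dict.mem_items_insert_self _ _ _,
                    (List.mem_erase_of_ne hk'ne).mpr hku⟩
                · exact ⟨u, by
                    rw [hitems]
                    exact List.mem_map.mpr ⟨(b', u), hu, by simp [beq_iff_eq, hb'b]⟩, hku⟩)]
          simp only [Prod.mk.injEq]
          constructor
          · rw [pvItems_erase]
            exact congrArg _ (pvFilter_doomed_cons st.1.items k [b] (by simp) L)
          · rw [hitems]
            exact congrArg _ (pvOutB_insert_case st.2.items hk2' b k lst hmem hkin hne (by omega) L)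
    · -- not doomed: state unchanged, predicates unchanged
      have hstep : pvPeelStep st (k, vs) = st := by
        unfold pvPeelStep; rw [if_neg hlen]
      rw [List.foldl_cons, hstep, ih (by simpa using hL.of_cons) st hk2
        (fun p hp x hx hr => hcount p hp x hx (pvRemB_mono _ _ _ _ hr))
        (fun k' vs' hm => hsafe k' vs' (List.mem_cons_of_mem _ hm))]
      simp only [Prod.mk.injEq]
      constructor
      · congr 1
        apply List.filter_congr
        intro p _
        simp [pvDoomedB_cons, hlen]
      · congr 1
        unfold pvOutB
        apply List.filterMap_congr
        intro p _
        unfold pvOutBf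
        simp only [pvRemB_cons, hlen]
        simp

-- ---- the B-side pass ----

theorem pvOfList_items (ps : List (String × List String)) (h : (ps.map Prod.fst).Nodup) :
    (PySem.Dict.ofList ps).items = ps := by
  have := PySem.Dict.items_foldl_insert_fresh (ν := List String) ps Prod.fst Prod.snd
    PySem.Dict.empty (fun a _ => rfl) h
  simpa [PySem.Dict.ofList, PySem.Dict.update, PySem.Dict.empty] using this

theorem pvDoomedKeys_nodup (cur : PySem.Dict String (List String)) (hk : cur.keys.Nodup) :
    ((cur.items.filter (fun kv => decide (kv.2.length ≤ 1))).map Prod.fst).Nodup :=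
  List.Nodup.sublist (List.filter_sublist.map Prod.fst) (by simpa [PySem.Dict.keys] using hk)

-- the doomed-dict membership tests of Source B, reduced to list-level predicates
theorem pvBoolExt {a b : Bool} (h : a = true ↔ b = true) : a = b := by
  cases a <;> cases b <;> simp_all

theorem pvDoomed_items (cur : PySem.Dict String (List String)) (hk : cur.keys.Nodup) :
    (pvDoomed cur).items = cur.items.filter (fun kv => decide (kv.2.length ≤ 1)) := by
  unfold pvDoomed
  exact pvOfList_items _ (pvDoomedKeys_nodup cur hk)

theorem pvDoomed_contains (cur : PySem.Dict String (List String)) (hk : cur.keys.Nodup)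
    (x : String) : (pvDoomed cur).contains x = pvDoomedB cur.items x := by
  apply pvBoolExt
  rw [pvDoomedB_iff]
  constructor
  · intro h
    obtain ⟨q, hqf, hqx⟩ := List.any_eq_true.mp h
    rw [pvDoomed_items cur hk] at hqf
    obtain ⟨hq, hlen⟩ := List.mem_filter.mp hqf
    exact ⟨q, hq, by simpa using hqx, by simpa using hlen⟩
  · rintro ⟨q, hq, hq1, hlen⟩
    refine List.any_eq_true.mpr ⟨q, ?_, by simp [hq1]⟩
    rw [pvDoomed_items cur hk]
    exact List.mem_filter.mpr ⟨hq, by simpa using hlen⟩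

theorem pvRemB_eq (cur : PySem.Dict String (List String)) (hk : cur.keys.Nodup)
    (b x : String) :
    ((pvDoomed cur).contains x && ((pvDoomed cur).getD x []).contains b) = pvRemB cur.items b x := by
  have hdi := pvDoomed_items cur hk
  have hknd : (pvDoomed cur).keys.Nodup := by
    simpa [PySem.Dict.keys, hdi] using pvDoomedKeys_nodup cur hk
  apply pvBoolExt
  rw [pvRemB_iff]
  constructor
  · intro h
    simp only [Bool.and_eq_true] at h
    obtain ⟨hcon, hbc⟩ := h
    obtain ⟨q, hqf, hqx⟩ := List.any_eq_true.mp hcon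
    have hq1 : q.1 = x := by simpa using hqx
    have hxq : (x, q.2) ∈ (pvDoomed cur).items := by rw [← hq1]; exact hqf
    have hgd : (pvDoomed cur).getD x [] = q.2 :=
      PySem.Dict.getD_of_mem_items _ hxq hknd []
    rw [hgd] at hbc
    rw [hdi] at hqf
    obtain ⟨hq, hlen⟩ := List.mem_filter.mp hqf
    exact ⟨q, hq, hq1, by simpa using hlen, by simpa using hbc⟩
  · rintro ⟨q, hq, hq1, hqlen, hqb⟩
    have hqf : q ∈ (pvDoomed cur).items := by
      rw [hdi]; exact List.mem_filter.mpr ⟨hq, by simpa using hqlen⟩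
    have hcon : (pvDoomed cur).contains x = true :=
      List.any_eq_true.mpr ⟨q, hqf, by simp [hq1]⟩
    have hxq : (x, q.2) ∈ (pvDoomed cur).items := by rw [← hq1]; exact hqf
    have hgd : (pvDoomed cur).getD x [] = q.2 :=
      PySem.Dict.getD_of_mem_items _ hxq hknd []
    simp only [hcon, hgd, Bool.true_and]
    simpa using hqb

theorem pvCondInsert_items (M : List (String × List String))
    (g : String × List String → List String) (hM : (M.map Prod.fst).Nodup)
    (nd : PySem.Dict String (List String)) (hnd : ∀ p ∈ M, nd.contains p.1 = false) :
    (M.foldl (fun nd p => if !(g p).isEmpty || p.2.isEmpty then nd.insert p.1 (g p) else nd) nd).items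
      = nd.items ++ M.filterMap (fun p => if !(g p).isEmpty || p.2.isEmpty then some (p.1, g p) else none) := by
  induction M generalizing nd with
  | nil => simp
  | cons p M ih =>
    have hMt : (M.map Prod.fst).Nodup := (List.nodup_cons.mp (by simpa using hM)).2
    have hpM : p.1 ∉ M.map Prod.fst := (List.nodup_cons.mp (by simpa using hM)).1
    rw [List.foldl_cons, List.filterMap_cons]
    by_cases hc : (!(g p).isEmpty || p.2.isEmpty) = true
    · rw [if_pos hc, if_pos hc, ih hMt (nd.insert p.1 (g p))
        (fun q hq => by
          rw [PySem.Dict.contains_insert]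
          have hq1 : (q.1 == p.1) = false := by
            refine beq_eq_false_iff_ne.mpr ?_
            intro hEq
            exact hpM (hEq ▸ List.mem_map.mpr ⟨q, hq, rfl⟩)
          rw [hq1, Bool.false_or]
          exact hnd q (List.mem_cons_of_mem _ hq)),
        PySem.Dict.items_insert_of_not_contains _ _ (hnd p List.mem_cons_self)]
      simp
    · rw [if_neg hc, if_neg hc, ih hMt nd (fun q hq => hnd q (List.mem_cons_of_mem _ hq))]

theorem pvPass_eq (cur other : PySem.Dict String (List String))
    (hk : cur.keys.Nodup) (hk2 : other.keys.Nodup) :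
    pvPass cur other =
      (PySem.Dict.mk (cur.items.filter (fun kv => !pvDoomedB cur.items kv.1)),
       PySem.Dict.mk (pvOutB cur.items other.items)) := by
  unfold pvPass
  simp only [Prod.mk.injEq]
  constructor
  · apply PySem.Dict.ext
    rw [pvOfList_items]
    · apply List.filter_congr
      intro p _
      rw [pvDoomed_contains cur hk]
    · refine List.Nodup.sublist (List.filter_sublist.map Prod.fst) ?_
      simpa [PySem.Dict.keys] using hk
  · apply PySem.Dict.ext
    refine (pvCondInsert_items other.items
      (fun p => p.2.filter (fun x => !((pvDoomed cur).contains x && ((pvDoomed cur).getD x []).contains p.1)))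
      (by simpa [PySem.Dict.keys] using hk2) PySem.Dict.empty (fun _ _ => rfl)).trans ?_
    simp only [List.nil_append]
    unfold pvOutB
    apply List.filterMap_congr
    intro p _
    have hkeq : p.2.filter (fun x => !((pvDoomed cur).contains x && ((pvDoomed cur).getD x []).contains p.1))
        = p.2.filter (fun x => !pvRemB cur.items p.1 x) := by
      apply List.filter_congr
      intro x _
      rw [pvRemB_eq cur hk]
    rw [hkeq]
    unfold pvOutBf
    by_cases hc : ((p.2.filter (fun x => !pvRemB cur.items p.1 x)).isEmpty && !p.2.isEmpty) = true
    · have hc' := hc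
      simp only [Bool.and_eq_true] at hc'
      obtain ⟨h1, h2⟩ := hc'
      have h2' : p.2.isEmpty = false := by simpa using h2
      rw [if_neg (by simp [h1, h2']), if_pos hc]
    · have hc1 : (!(p.2.filter (fun x => !pvRemB cur.items p.1 x)).isEmpty || p.2.isEmpty) = true := by
        cases e1 : (p.2.filter (fun x => !pvRemB cur.items p.1 x)).isEmpty <;>
          cases e2 : p.2.isEmpty <;> simp_all
      rw [if_pos hc1, if_neg hc]

-- ---- the bipartite-consistency invariant and its preservation by a pass ----

def pvSymP (a b : PySem.Dict String (List String)) : Prop :=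
  ∀ p ∈ a.items, ∀ v ∈ p.2, ∃ lst, (v, lst) ∈ b.items ∧ p.1 ∈ lst

def pvInv (a b : PySem.Dict String (List String)) : Prop :=
  a.keys.Nodup ∧ b.keys.Nodup ∧ (∀ p ∈ a.items, p.2.Nodup) ∧ (∀ p ∈ b.items, p.2.Nodup) ∧
    pvSymP a b ∧ pvSymP b a

theorem pvOutBf_fst (L : List (String × List String)) (q p : String × List String)
    (h : pvOutBf L q = some p) : p.1 = q.1 ∧ p.2 = q.2.filter (fun x => !pvRemB L q.1 x) := by
  simp only [pvOutBf] at h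
  split at h
  · cases h
  · cases h; exact ⟨rfl, rfl⟩

theorem pvOutB_keys_sublist (L M : List (String × List String)) :
    ((pvOutB L M).map Prod.fst).Sublist (M.map Prod.fst) := by
  induction M with
  | nil => simp [pvOutB]
  | cons q M ih =>
    unfold pvOutB at *
    rw [List.filterMap_cons]
    cases hf : pvOutBf L q with
    | none => exact ih.trans (List.sublist_cons_self _ _)
    | some p =>
      rw [List.map_cons, List.map_cons, (pvOutBf_fst L q p hf).1]
      exact ih.cons₂ _

theorem pvMem_outB {L M : List (String × List String)} {p : String × List String}
    (h : p ∈ pvOutB L M) :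
    ∃ lst, (p.1, lst) ∈ M ∧ p.2 = lst.filter (fun x => !pvRemB L p.1 x) := by
  obtain ⟨q, hq, hf⟩ := List.mem_filterMap.mp h
  obtain ⟨h1, h2⟩ := pvOutBf_fst L q p hf
  exact ⟨q.2, by rw [h1]; exact hq, by rw [h2, h1]⟩

theorem pvOutB_mem_of (L : List (String × List String)) {M : List (String × List String)}
    {b : String} {lst : List String} (hm : (b, lst) ∈ M)
    (hne : lst.filter (fun x => !pvRemB L b x) ≠ []) :
    (b, lst.filter (fun x => !pvRemB L b x)) ∈ pvOutB L M := by
  apply List.mem_filterMap.mpr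
  refine ⟨(b, lst), hm, ?_⟩
  unfold pvOutBf
  rw [if_neg]
  simp [List.isEmpty_iff, hne]

theorem pvInv_pass (cur other : PySem.Dict String (List String)) (h : pvInv cur other) :
    pvInv (PySem.Dict.mk (pvOutB cur.items other.items))
          (PySem.Dict.mk (cur.items.filter (fun kv => !pvDoomedB cur.items kv.1))) := by
  obtain ⟨hka, hkb, hva, hvb, hs1, hs2⟩ := h
  have hka' : (cur.items.map Prod.fst).Nodup := by simpa [PySem.Dict.keys] using hka
  have hkb' : (other.items.map Prod.fst).Nodup := by simpa [PySem.Dict.keys] using hkb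
  refine ⟨?_, ?_, ?_, ?_, ?_, ?_⟩
  · simpa [PySem.Dict.keys] using
      List.Nodup.sublist (pvOutB_keys_sublist cur.items other.items) hkb'
  · simpa [PySem.Dict.keys] using
      List.Nodup.sublist (List.filter_sublist.map Prod.fst) hka'
  · intro p hp
    obtain ⟨lst, hm, hpf⟩ := pvMem_outB hp
    rw [hpf]
    exact (hvb _ hm).filter _
  · intro p hp
    exact hva p (List.mem_of_mem_filter hp)
  · -- every edge of the peeled `other` is mirrored in the peeled `cur`
    intro p hp x hx
    obtain ⟨lst, hm, hpf⟩ := pvMem_outB hp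
    rw [hpf] at hx
    obtain ⟨hxl, hxr⟩ := List.mem_filter.mp hx
    obtain ⟨vs, hvs, hbvs⟩ := hs2 (p.1, lst) hm x hxl
    have hnd : ¬ vs.length ≤ 1 := by
      intro hle
      have : pvRemB cur.items p.1 x = true :=
        (pvRemB_iff _ _ _).mpr ⟨(x, vs), hvs, rfl, hle, hbvs⟩
      simp [this] at hxr
    refine ⟨vs, ?_, hbvs⟩
    apply List.mem_filter.mpr
    refine ⟨hvs, ?_⟩
    have : pvDoomedB cur.items x = false := by
      cases hd : pvDoomedB cur.items x
      · rfl
      · obtain ⟨q, hq, hq1, hqlen⟩ := (pvDoomedB_iff _ _).mp hd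
        have : q = (x, vs) := by
          obtain ⟨q1, q2⟩ := q
          simp only at hq1; subst hq1
          exact congrArg _ (pvKey_unique hka' hq hvs)
        rw [this] at hqlen
        exact absurd hqlen hnd
    simp [this]
  · -- every edge of the peeled `cur` is mirrored in the peeled `other`
    intro p hp v hv
    obtain ⟨hpm, hpd⟩ := List.mem_filter.mp hp
    have hplen : ¬ p.2.length ≤ 1 := by
      intro hle
      have : pvDoomedB cur.items p.1 = true :=
        (pvDoomedB_iff _ _).mpr ⟨p, hpm, rfl, hle⟩
      simp [this] at hpd
    obtain ⟨lst, hm, hkin⟩ := hs1 p hpm v hv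
    have hkkept : p.1 ∈ lst.filter (fun x => !pvRemB cur.items v x) := by
      apply List.mem_filter.mpr
      refine ⟨hkin, ?_⟩
      have : pvRemB cur.items v p.1 = false := by
        cases hr : pvRemB cur.items v p.1
        · rfl
        · obtain ⟨q, hq, hq1, hqlen, hqv⟩ := (pvRemB_iff _ _ _).mp hr
          have : q = p := by
            obtain ⟨q1, q2⟩ := q
            obtain ⟨p1, p2⟩ := p
            simp only at hq1; subst hq1
            exact congrArg _ (pvKey_unique hka' hq hpm)
          rw [this] at hqlen
          exact absurd hqlen hplen
      simp [this]
    exact ⟨lst.filter (fun x => !pvRemB cur.items v x),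
      pvOutB_mem_of cur.items hm (List.ne_nil_of_mem hkkept), hkkept⟩

-- ---- outer loop equivalence: B's while-loop with a flag versus A's re-swapping recursion ----

theorem pvFilterMap_length_all_some {α β : Type} (f : α → Option β) (l : List α)
    (h : ∀ a ∈ l, (f a).isSome) : (l.filterMap f).length = l.length := by
  induction l with
  | nil => rfl
  | cons a l ih =>
    rw [List.filterMap_cons]
    cases hf : f a with
    | none => exact absurd (hf ▸ h a List.mem_cons_self) (by simp)
    | some b =>
      simp only [List.length_cons]
      rw [ih (fun a ha => h a (List.mem_cons_of_mem _ ha))]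

theorem pvGo_eq (n : Nat) : ∀ (cur other : PySem.Dict String (List String)) (co oo : Int)
    (f : Bool), cur.size + other.size ≤ n → pvInv cur other →
    pvGoB cur other co oo f =
      (if f then (pvGoA cur other co oo).swap else pvGoA cur other co oo) := by
  induction n using Nat.strong_induction_on with
  | _ n IH =>
  intro cur other co oo f hn hinv
  obtain ⟨hka, hkb, hva, hvb, hs1, hs2⟩ := hinv
  have hka' : (cur.items.map Prod.fst).Nodup := by simpa [PySem.Dict.keys] using hka
  have hpassA := pvPeelFold_eq cur.items hka' (cur, other) hkb
    (fun p hp x hx _ => pvCount_one_of_nodup (hvb p hp) hx)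
    (fun k vs hm _ b hb => hs1 (k, vs) hm b hb)
  have hpassB := pvPass_eq cur other hka hkb
  rw [pvGoA, pvGoB, hpassA, hpassB]
  by_cases hc : ((PySem.Dict.mk (cur.items.filter (fun kv => !pvDoomedB cur.items kv.1)),
        PySem.Dict.mk (pvOutB cur.items other.items)).1.size ≠ cur.size ∧
      (cur.size : Int) ≠ co ∧
      (PySem.Dict.mk (cur.items.filter (fun kv => !pvDoomedB cur.items kv.1)),
        PySem.Dict.mk (pvOutB cur.items other.items)).2.size ≠ other.size ∧
      (other.size : Int) ≠ oo)
  · rw [dif_pos hc, dif_pos hc]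
    obtain ⟨hc1, hc2, hc3, hc4⟩ := hc
    have hle1 : (PySem.Dict.mk (cur.items.filter (fun kv => !pvDoomedB cur.items kv.1))).size
        ≤ cur.size := List.length_filter_le _ _
    have hle2 : (PySem.Dict.mk (pvOutB cur.items other.items)).size ≤ other.size :=
      List.length_filterMap_le _ _
    simp only at hc1 hc3
    have hrec := IH ((PySem.Dict.mk (pvOutB cur.items other.items)).size +
        (PySem.Dict.mk (cur.items.filter (fun kv => !pvDoomedB cur.items kv.1))).size)
      (by omega) _ _ (other.size : Int) (cur.size : Int) (!f) (le_refl _)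
      (pvInv_pass cur other ⟨hka, hkb, hva, hvb, hs1, hs2⟩)
    simp only at hrec ⊢
    rw [hrec]
    cases f <;> simp [Prod.swap]
  · rw [dif_neg hc, dif_neg hc]
    cases f <;> simp [Prod.swap]

-- ---- reading the Boolean precondition back as propositions ----

theorem pvVN_prop {d : PySem.Dict String (List String)} (h : pvVN d = true) :
    ∀ p ∈ d.items, p.2.Nodup := by
  intro p hp
  simpa using List.all_eq_true.mp h p hp

theorem pvSafeDir_symP {a b : PySem.Dict String (List String)} (hkb : b.keys.Nodup)
    (h : pvSafeDir a b = true) : pvSymP a b := by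
  intro p hp v hv
  have h2 := List.all_eq_true.mp (List.all_eq_true.mp h p hp) v hv
  simp only [Bool.and_eq_true] at h2
  obtain ⟨hc, hg⟩ := h2
  obtain ⟨q, hq, hqv⟩ := List.any_eq_true.mp hc
  have hqv' : q.1 = v := by simpa using hqv
  have hxq : (v, q.2) ∈ b.items := by rw [← hqv']; exact hq
  have hgd : b.getD v [] = q.2 := PySem.Dict.getD_of_mem_items _ hxq hkb []
  rw [hgd] at hg
  exact ⟨q.2, hxq, by simpa using hg⟩

theorem pvSafe1_prop {a b : PySem.Dict String (List String)} (hkb : b.keys.Nodup)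
    (h : pvSafe1 a b = true) :
    ∀ k vs, (k, vs) ∈ a.items → vs.length ≤ 1 → ∀ v ∈ vs,
      ∃ lst, (v, lst) ∈ b.items ∧ k ∈ lst := by
  intro k vs hm hlen v hv
  have h1 := List.all_eq_true.mp h (k, vs) hm
  simp only [Bool.or_eq_true, Bool.not_eq_true', decide_eq_false_iff_not] at h1
  rcases h1 with h1 | h1
  · exact absurd hlen h1
  · have h2 := List.all_eq_true.mp h1 v hv
    simp only [Bool.and_eq_true] at h2
    obtain ⟨hc, hg⟩ := h2
    obtain ⟨q, hq, hqv⟩ := List.any_eq_true.mp hc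
    have hqv' : q.1 = v := by simpa using hqv
    have hxq : (v, q.2) ∈ b.items := by rw [← hqv']; exact hq
    have hgd : b.getD v [] = q.2 := PySem.Dict.getD_of_mem_items _ hxq hkb []
    rw [hgd] at hg
    exact ⟨q.2, hxq, by simpa using hg⟩

-- ===== VERDICT (by name: the statement is the Claim_ definition above) =====
theorem pvTouched1_prop {a b : PySem.Dict String (List String)} (h : pvTouched1 a b = true) :
    ∀ p ∈ b.items, ∀ x ∈ p.2, pvRemB a.items p.1 x = true → p.2.count x = 1 := by
  intro p hp x hx hr
  have h1 := List.all_eq_true.mp (List.all_eq_true.mp h p hp) x hx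
  simp only [Bool.or_eq_true, Bool.not_eq_true', decide_eq_true_eq] at h1
  rcases h1 with h1 | h1
  · rw [hr] at h1; cases h1
  · exact h1

theorem remove1DegreeNodes_spec : Claim_equal_remove1DegreeNodes := by
  unfold Claim_equal_remove1DegreeNodes
  intro dictA dictB ao bo _ hpre
  unfold Spec_remove1DegreeNodes remove1DegreeNodes remove1DegreeNodes_alt
  unfold Pre_remove1DegreeNodes at hpre
  simp only [Bool.and_eq_true, Bool.or_eq_true] at hpre
  have hka := PySem.Dict.nodup_keys_ofList dictA
  have hkb := PySem.Dict.nodup_keys_ofList dictB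
  rcases hpre with ⟨⟨⟨hvna, hvnb⟩, hsd1⟩, hsd2⟩ | ⟨⟨hs1, hst⟩, htc⟩
  · -- fully consistent bipartite graph: every recursion level is safe
    have hinv : pvInv (PySem.Dict.ofList dictA) (PySem.Dict.ofList dictB) :=
      ⟨hka, hkb, pvVN_prop hvna, pvVN_prop hvnb,
       pvSafeDir_symP hkb hsd1, pvSafeDir_symP hka hsd2⟩
    have h := pvGo_eq ((PySem.Dict.ofList dictA).size + (PySem.Dict.ofList dictB).size)
      (PySem.Dict.ofList dictA) (PySem.Dict.ofList dictB) ao bo false (le_refl _) hinv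
    simp only [Bool.false_eq_true, if_false] at h
    rw [h]
  · -- safe first pass that is also the last one
    have hka' : ((PySem.Dict.ofList dictA).items.map Prod.fst).Nodup := by
      simpa [PySem.Dict.keys] using hka
    have hpassA := pvPeelFold_eq (PySem.Dict.ofList dictA).items hka'
      (PySem.Dict.ofList dictA, PySem.Dict.ofList dictB) hkb
      (fun p hp x hx hr => pvTouched1_prop htc p hp x hx hr)
      (fun k vs hm hlen b hb => pvSafe1_prop hkb hs1 k vs hm hlen b hb)
    have hpassB := pvPass_eq (PySem.Dict.ofList dictA) (PySem.Dict.ofList dictB) hka hkb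
    rw [pvGoA, pvGoB, hpassA, hpassB]
    have hcf : ¬ ((PySem.Dict.mk ((PySem.Dict.ofList dictA).items.filter
          (fun kv => !pvDoomedB (PySem.Dict.ofList dictA).items kv.1)),
        PySem.Dict.mk (pvOutB (PySem.Dict.ofList dictA).items (PySem.Dict.ofList dictB).items)).1.size
          ≠ (PySem.Dict.ofList dictA).size ∧
        ((PySem.Dict.ofList dictA).size : Int) ≠ ao ∧
        (PySem.Dict.mk ((PySem.Dict.ofList dictA).items.filter
          (fun kv => !pvDoomedB (PySem.Dict.ofList dictA).items kv.1)),
        PySem.Dict.mk (pvOutB (PySem.Dict.ofList dictA).items (PySem.Dict.ofList dictB).items)).2.size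
          ≠ (PySem.Dict.ofList dictB).size ∧
        ((PySem.Dict.ofList dictB).size : Int) ≠ bo) := by
      rintro ⟨hc1, hc2, hc3, hc4⟩
      unfold pvStop1 at hst
      simp only [Bool.or_eq_true, decide_eq_true_eq] at hst
      rcases hst with ((h | h) | h) | h
      · exact hc2 h
      · exact hc4 h
      · -- no degree-≤1 key at all: the A side does not shrink
        have hfe : (PySem.Dict.ofList dictA).items.filter
            (fun kv => !pvDoomedB (PySem.Dict.ofList dictA).items kv.1)
            = (PySem.Dict.ofList dictA).items := by
          apply List.filter_eq_self.mpr
          intro p hp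
          have hdf : pvDoomedB (PySem.Dict.ofList dictA).items p.1 = false := by
            cases hd : pvDoomedB (PySem.Dict.ofList dictA).items p.1
            · rfl
            · obtain ⟨q, hq, _, hqlen⟩ := (pvDoomedB_iff _ _).mp hd
              have := List.all_eq_true.mp h q hq
              simp only [decide_eq_true_eq] at this
              omega
          simp [hdf]
        exact hc1 (by simp [PySem.Dict.size, hfe])
      · -- no entry of the B side gets emptied: the B side does not shrink
        have hlen : (pvOutB (PySem.Dict.ofList dictA).items (PySem.Dict.ofList dictB).items).length
            = (PySem.Dict.ofList dictB).items.length := by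
          apply pvFilterMap_length_all_some
          intro p hp
          have hd := List.all_eq_true.mp h p hp
          simp only [Bool.or_eq_true] at hd
          rcases hd with he | hx
          · have hpe : p.2 = [] := by simpa [List.isEmpty_iff] using he
            simp [pvOutBf, hpe]
          · obtain ⟨x, hx2, hxr⟩ := List.any_eq_true.mp hx
            have hxk : x ∈ p.2.filter (fun x => !pvRemB (PySem.Dict.ofList dictA).items p.1 x) :=
              List.mem_filter.mpr ⟨hx2, hxr⟩
            have hne : (p.2.filter (fun x => !pvRemB (PySem.Dict.ofList dictA).items p.1 x)).isEmpty = false := by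
              simp [List.isEmpty_iff, List.ne_nil_of_mem hxk]
            simp [pvOutBf, hne]
        exact hc3 (by simp [PySem.Dict.size, hlen])
    rw [dif_neg hcf, dif_neg hcf]
    simp
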